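-- pv_equiv track=rewrite | github.com/kiddulu916/BH-framework | stages/vuln_scan/runners/result_analyzer.py | categorize_finding
-- ===== SOURCE A (Python) =====
-- def categorize_finding(title: str, description: str, tool_name: str) -> str:
--     """Categorize finding based on title, description, and tool"""
--     title_lower = title.lower()
--     desc_lower = description.lower()
--
--     # OWASP Top 10 categories
--     if any(keyword in title_lower or keyword in desc_lower for keyword in ['injection', 'sql', 'nosql', 'command']):
--         return 'A01:2021 - Broken Access Control'
--     elif any(keyword in title_lower or keyword in desc_lower for keyword in ['authentication', 'auth', 'login', 'session']):
--         return 'A02:2021 - Cryptographic Failures'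
--     elif any(keyword in title_lower or keyword in desc_lower for keyword in ['xss', 'cross-site', 'script']):
--         return 'A03:2021 - Injection'
--     elif any(keyword in title_lower or keyword in desc_lower for keyword in ['insecure', 'design', 'architecture']):
--         return 'A04:2021 - Insecure Design'
--     elif any(keyword in title_lower or keyword in desc_lower for keyword in ['misconfiguration', 'config', 'default']):
--         return 'A05:2021 - Security Misconfiguration'
--     elif any(keyword in title_lower or keyword in desc_lower for keyword in ['vulnerable', 'outdated', 'version']):
--         return 'A06:2021 - Vulnerable and Outdated Components'
--     elif any(keyword in title_lower or keyword in desc_lower for keyword in ['authorization', 'permission', 'access']):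
--         return 'A07:2021 - Identification and Authentication Failures'
--     elif any(keyword in title_lower or keyword in desc_lower for keyword in ['data', 'exposure', 'leak', 'sensitive']):
--         return 'A08:2021 - Software and Data Integrity Failures'
--     elif any(keyword in title_lower or keyword in desc_lower for keyword in ['logging', 'monitoring', 'audit']):
--         return 'A09:2021 - Security Logging and Monitoring Failures'
--     elif any(keyword in title_lower or keyword in desc_lower for keyword in ['ssrf', 'csrf', 'request']):
--         return 'A10:2021 - Server-Side Request Forgery'
--     else:
--         return 'Other'
-- ===== SOURCE B (Python) =====
-- # Rank-minimum rewrite: a flat alphabetical keyword->rank table; take the MINIMUM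
-- # category rank over all keywords occurring in the lowered title/description,
-- # then map that rank to the category name ('Other' when nothing matched).
-- _KEYWORD_RANK = [
--     ('access', 6), ('architecture', 3), ('audit', 8), ('auth', 1),
--     ('authentication', 1), ('authorization', 6), ('command', 0), ('config', 4),
--     ('cross-site', 2), ('csrf', 9), ('data', 7), ('default', 4), ('design', 3),
--     ('exposure', 7), ('injection', 0), ('insecure', 3), ('leak', 7),
--     ('logging', 8), ('login', 1), ('misconfiguration', 4), ('monitoring', 8),
--     ('nosql', 0), ('outdated', 5), ('permission', 6), ('request', 9),
--     ('script', 2), ('sensitive', 7), ('session', 1), ('sql', 0), ('ssrf', 9),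
--     ('version', 5), ('vulnerable', 5), ('xss', 2),
-- ]
-- _NAMES = [
--     'A01:2021 - Broken Access Control',
--     'A02:2021 - Cryptographic Failures',
--     'A03:2021 - Injection',
--     'A04:2021 - Insecure Design',
--     'A05:2021 - Security Misconfiguration',
--     'A06:2021 - Vulnerable and Outdated Components',
--     'A07:2021 - Identification and Authentication Failures',
--     'A08:2021 - Software and Data Integrity Failures',
--     'A09:2021 - Security Logging and Monitoring Failures',
--     'A10:2021 - Server-Side Request Forgery',
-- ]
--
-- def categorize_finding(title: str, description: str, tool_name: str) -> str:
--     t = title.lower()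
--     d = description.lower()
--     best = len(_NAMES)
--     for kw, rank in _KEYWORD_RANK:
--         if kw in t or kw in d:
--             best = min(best, rank)
--     return _NAMES[best] if best < len(_NAMES) else 'Other'
-- ===== Notes on version B (the rewrite author's own statement) =====
-- stated objective: alternative
-- what changed: Instead of an ordered if/elif cascade returning at the first matching keyword group, B folds a flat alphabetically-ordered keyword->rank table with a minimum-rank accumulator (order-insensitive) and then maps the minimum rank to its category name, defaulting to 'Other'.
import Mathlib
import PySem

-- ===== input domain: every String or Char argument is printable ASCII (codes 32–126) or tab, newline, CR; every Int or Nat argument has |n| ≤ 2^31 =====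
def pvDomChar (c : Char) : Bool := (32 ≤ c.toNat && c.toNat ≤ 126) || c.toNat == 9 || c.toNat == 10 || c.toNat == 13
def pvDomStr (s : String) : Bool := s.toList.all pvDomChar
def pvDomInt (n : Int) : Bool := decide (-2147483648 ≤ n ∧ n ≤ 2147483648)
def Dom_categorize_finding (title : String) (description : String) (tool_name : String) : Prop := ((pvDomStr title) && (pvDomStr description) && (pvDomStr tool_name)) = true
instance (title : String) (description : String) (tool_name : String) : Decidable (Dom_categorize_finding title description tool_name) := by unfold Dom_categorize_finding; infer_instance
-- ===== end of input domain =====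

-- B replaces A's ordered if/elif cascade (first matching group wins) by a flat alphabetical
-- keyword->rank table folded with a MINIMUM-rank accumulator, then mapped to the name (objective: alternative).

-- ===== PORT A =====
def categorize_finding (title : String) (description : String) (tool_name : String) : String :=
  let title_lower := PySem.Str.lower title
  let desc_lower := PySem.Str.lower description
  if (["injection", "sql", "nosql", "command"].any (fun k => PySem.Str.isIn k title_lower || PySem.Str.isIn k desc_lower)) then
    "A01:2021 - Broken Access Control"
  else if (["authentication", "auth", "login", "session"].any (fun k => PySem.Str.isIn k title_lower || PySem.Str.isIn k desc_lower)) then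
    "A02:2021 - Cryptographic Failures"
  else if (["xss", "cross-site", "script"].any (fun k => PySem.Str.isIn k title_lower || PySem.Str.isIn k desc_lower)) then
    "A03:2021 - Injection"
  else if (["insecure", "design", "architecture"].any (fun k => PySem.Str.isIn k title_lower || PySem.Str.isIn k desc_lower)) then
    "A04:2021 - Insecure Design"
  else if (["misconfiguration", "config", "default"].any (fun k => PySem.Str.isIn k title_lower || PySem.Str.isIn k desc_lower)) then
    "A05:2021 - Security Misconfiguration"
  else if (["vulnerable", "outdated", "version"].any (fun k => PySem.Str.isIn k title_lower || PySem.Str.isIn k desc_lower)) then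
    "A06:2021 - Vulnerable and Outdated Components"
  else if (["authorization", "permission", "access"].any (fun k => PySem.Str.isIn k title_lower || PySem.Str.isIn k desc_lower)) then
    "A07:2021 - Identification and Authentication Failures"
  else if (["data", "exposure", "leak", "sensitive"].any (fun k => PySem.Str.isIn k title_lower || PySem.Str.isIn k desc_lower)) then
    "A08:2021 - Software and Data Integrity Failures"
  else if (["logging", "monitoring", "audit"].any (fun k => PySem.Str.isIn k title_lower || PySem.Str.isIn k desc_lower)) then
    "A09:2021 - Security Logging and Monitoring Failures"
  else if (["ssrf", "csrf", "request"].any (fun k => PySem.Str.isIn k title_lower || PySem.Str.isIn k desc_lower)) then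
    "A10:2021 - Server-Side Request Forgery"
  else
    "Other"

-- ===== PORT B =====
-- flat alphabetical keyword -> category-rank table (Source B's _KEYWORD_RANK)
def kwRank : List (String × Nat) :=
  [("access", 6), ("architecture", 3), ("audit", 8), ("auth", 1),
   ("authentication", 1), ("authorization", 6), ("command", 0), ("config", 4),
   ("cross-site", 2), ("csrf", 9), ("data", 7), ("default", 4), ("design", 3),
   ("exposure", 7), ("injection", 0), ("insecure", 3), ("leak", 7),
   ("logging", 8), ("login", 1), ("misconfiguration", 4), ("monitoring", 8),
   ("nosql", 0), ("outdated", 5), ("permission", 6), ("request", 9),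
   ("script", 2), ("sensitive", 7), ("session", 1), ("sql", 0), ("ssrf", 9),
   ("version", 5), ("vulnerable", 5), ("xss", 2)]

-- Source B's _NAMES
def owaspNames : List String :=
  ["A01:2021 - Broken Access Control",
   "A02:2021 - Cryptographic Failures",
   "A03:2021 - Injection",
   "A04:2021 - Insecure Design",
   "A05:2021 - Security Misconfiguration",
   "A06:2021 - Vulnerable and Outdated Components",
   "A07:2021 - Identification and Authentication Failures",
   "A08:2021 - Software and Data Integrity Failures",
   "A09:2021 - Security Logging and Monitoring Failures",
   "A10:2021 - Server-Side Request Forgery"]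

-- loop body of Source B: if kw in t or kw in d: best = min(best, rank)
def bestStep (t d : String) (acc : Nat) (p : String × Nat) : Nat :=
  if PySem.Str.isIn p.1 t || PySem.Str.isIn p.1 d then min acc p.2 else acc

def categorize_finding_alt (title : String) (description : String) (tool_name : String) : String :=
  let t := PySem.Str.lower title
  let d := PySem.Str.lower description
  let best := kwRank.foldl (bestStep t d) owaspNames.length
  if best < owaspNames.length then owaspNames.getD best "Other" else "Other"

-- ===== PRECONDITION & SPEC =====
def Spec_categorize_finding (title : String) (description : String) (tool_name : String) (out : String) : Prop := out = categorize_finding_alt title description tool_name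
instance (title : String) (description : String) (tool_name : String) (out : String) : Decidable (Spec_categorize_finding title description tool_name out) := by unfold Spec_categorize_finding; infer_instance

-- ===== CLAIM (what is proved, stated in full; the proofs are below) =====
def Claim_equal_categorize_finding : Prop := ∀ (title : String) (description : String) (tool_name : String), Dom_categorize_finding title description tool_name → Spec_categorize_finding title description tool_name (categorize_finding title description tool_name)

-- ===== LEMMAS AND PROOFS =====

-- the flat table rearranged into A's rank-grouped order (a permutation of kwRank)
def kwGrouped : List (String × Nat) :=
  (["injection", "sql", "nosql", "command"].map (fun k => (k, 0))) ++
  (["authentication", "auth", "login", "session"].map (fun k => (k, 1))) ++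
  (["xss", "cross-site", "script"].map (fun k => (k, 2))) ++
  (["insecure", "design", "architecture"].map (fun k => (k, 3))) ++
  (["misconfiguration", "config", "default"].map (fun k => (k, 4))) ++
  (["vulnerable", "outdated", "version"].map (fun k => (k, 5))) ++
  (["authorization", "permission", "access"].map (fun k => (k, 6))) ++
  (["data", "exposure", "leak", "sensitive"].map (fun k => (k, 7))) ++
  (["logging", "monitoring", "audit"].map (fun k => (k, 8))) ++
  (["ssrf", "csrf", "request"].map (fun k => (k, 9)))

-- the min-fold is insensitive to the order of the table
theorem bestStep_rcomm (t d : String) : ∀ (b : Nat) (p q : String × Nat),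
    bestStep t d (bestStep t d b p) q = bestStep t d (bestStep t d b q) p := by
  intro b p q
  unfold bestStep
  split_ifs <;> omega

def stepIf (b : Bool) (r acc : Nat) : Nat := if b then min acc r else acc

-- folding one constant-rank group = one conditional min
theorem fold_group (t d : String) (r : Nat) (ks : List String) (acc : Nat) :
    List.foldl (bestStep t d) acc (ks.map (fun k => (k, r)))
      = stepIf (ks.any (fun k => PySem.Str.isIn k t || PySem.Str.isIn k d)) r acc := by
  induction ks generalizing acc with
  | nil => simp [stepIf]
  | cons k ks ih =>
      simp only [List.map_cons, List.foldl_cons, List.any_cons, bestStep]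
      cases hm : (PySem.Str.isIn k t || PySem.Str.isIn k d) with
      | false => simp [ih]
      | true =>
          simp only [if_pos, Bool.true_or, ih, stepIf]
          split_ifs <;> omega

-- the ten-way case analysis: first true group ↔ minimum rank, as a finite boolean fact
theorem chain_eq : ∀ (b0 b1 b2 b3 b4 b5 b6 b7 b8 b9 : Bool),
    (if b0 then "A01:2021 - Broken Access Control"
     else if b1 then "A02:2021 - Cryptographic Failures"
     else if b2 then "A03:2021 - Injection"
     else if b3 then "A04:2021 - Insecure Design"
     else if b4 then "A05:2021 - Security Misconfiguration"
     else if b5 then "A06:2021 - Vulnerable and Outdated Components"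
     else if b6 then "A07:2021 - Identification and Authentication Failures"
     else if b7 then "A08:2021 - Software and Data Integrity Failures"
     else if b8 then "A09:2021 - Security Logging and Monitoring Failures"
     else if b9 then "A10:2021 - Server-Side Request Forgery"
     else "Other")
    = (let best := stepIf b9 9 (stepIf b8 8 (stepIf b7 7 (stepIf b6 6 (stepIf b5 5
                     (stepIf b4 4 (stepIf b3 3 (stepIf b2 2 (stepIf b1 1 (stepIf b0 0 owaspNames.length)))))))));
       if best < owaspNames.length then owaspNames.getD best "Other" else "Other") := by
  decide

-- ===== VERDICT (by name: the statement is the Claim_ definition above) =====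
set_option maxHeartbeats 1000000 in
theorem categorize_finding_spec : Claim_equal_categorize_finding := by
  intro title description tool_name _
  unfold Spec_categorize_finding categorize_finding categorize_finding_alt
  have hperm : List.Perm kwRank kwGrouped := by decide
  have hfold :=
    @List.Perm.foldl_eq _ _ (bestStep (PySem.Str.lower title) (PySem.Str.lower description)) _ _
      ⟨bestStep_rcomm _ _⟩ hperm owaspNames.length
  simp only [hfold]
  simp only [kwGrouped, List.foldl_append, fold_group]
  exact chain_eq _ _ _ _ _ _ _ _ _ _
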